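-- pv_equiv track=rewrite | github.com/fzjawed/123-Number-Flip | 123-Flip.py | solve
-- ===== SOURCE A (Python) =====
-- def solve(n):
--     x = list(str(n))
--     for i in range(len(x)):
--         if x[i] != '3':
--             x[i] = '3'
--             break
--     result = int("".join(x))
--     return result
-- ===== SOURCE B (Python) =====
-- def solve(n):
--     s = str(n)
--     threes = '3' * len(s)
--     # binary search for the length of the leading all-'3' prefix:
--     # the predicate s[:m] == '3'*m is monotone (true for a prefix of m's)
--     lo, hi = 0, len(s)
--     while lo < hi:
--         mid = (lo + hi + 1) // 2
--         if s[:mid] == threes[:mid]: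
--             lo = mid
--         else:
--             hi = mid - 1
--     if lo == len(s):
--         return int(s)
--     return int(threes[:lo + 1] + s[lo + 1:])
-- ===== Notes on version B (the rewrite author's own statement) =====
-- stated objective: alternative
-- what changed: Replaces A's left-to-right mutate-and-break scan with a binary search on the monotone predicate s[:m] == '3'*m to find the length of the leading run of '3's, then builds the result by one splice of the precomputed '3'*len(s) string with the untouched suffix.
import Mathlib
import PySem

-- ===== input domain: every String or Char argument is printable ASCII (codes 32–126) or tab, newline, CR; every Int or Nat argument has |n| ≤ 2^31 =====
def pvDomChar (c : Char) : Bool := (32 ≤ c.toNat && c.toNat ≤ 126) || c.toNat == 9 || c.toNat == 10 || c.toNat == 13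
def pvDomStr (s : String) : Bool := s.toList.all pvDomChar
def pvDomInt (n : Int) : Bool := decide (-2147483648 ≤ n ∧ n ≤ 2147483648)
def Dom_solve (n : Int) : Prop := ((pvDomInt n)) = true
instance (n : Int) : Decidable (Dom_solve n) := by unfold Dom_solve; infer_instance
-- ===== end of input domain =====

-- B finds the leading run of '3's by binary search on the monotone prefix property
-- s[:m] == '3'*m, then splices, instead of A's left-to-right mutate-and-break scan
-- (objective: alternative).

-- ===== PORT A =====
-- the for-loop with break: scan the digits, flip the first non-'3' to '3', stop
def solveLoop : List Char → List Char
  | [] => []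
  | c :: t => if c ≠ '3' then '3' :: t else c :: solveLoop t

def solve (n : Int) : Int :=
  let x := (PySem.Int.toStr n).toList
  let x := solveLoop x
  -- int("".join(x)); never raises here (the joined chars always form a valid int literal)
  match PySem.Int.ofChars? x with
  | some v => v
  | none => 0

-- ===== PORT B =====
-- the while-loop of Source B: binary search for the length of the leading all-'3' prefix
def bsearch3 (s threes : List Char) (lo hi : Nat) : Nat :=
  if _h : lo < hi then
    let mid := (lo + hi + 1) / 2
    if s.take mid = threes.take mid then bsearch3 s threes mid hi
    else bsearch3 s threes lo (mid - 1)
  else lo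
termination_by hi - lo
decreasing_by all_goals omega

def solve_alt (n : Int) : Int :=
  let s := (PySem.Int.toStr n).toList
  let threes := List.replicate s.length '3'   -- '3' * len(s)
  let lo := bsearch3 s threes 0 s.length
  if lo = s.length then (PySem.Int.ofChars? s).getD 0
  else
    -- threes[:lo+1] + s[lo+1:]
    (PySem.Int.ofChars? (threes.take (lo + 1) ++ s.drop (lo + 1))).getD 0

-- ===== PRECONDITION & SPEC =====
def Spec_solve (n : Int) (out : Int) : Prop := out = solve_alt n
instance (n : Int) (out : Int) : Decidable (Spec_solve n out) := by unfold Spec_solve; infer_instance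

-- ===== CLAIM (what is proved, stated in full; the proofs are below) =====
def Claim_equal_solve : Prop := ∀ (n : Int), Dom_solve n → Spec_solve n (solve n)

-- ===== LEMMAS AND PROOFS =====

theorem takeWhile3_le (s : List Char) :
    (s.takeWhile (· == '3')).length ≤ s.length := by
  induction s with
  | nil => simp
  | cons c t ih =>
    by_cases h : c = '3'
    · simpa [List.takeWhile, h] using ih
    · have hb : (c == '3') = false := by simp [h]
      simp [List.takeWhile, hb]

-- the binary-search predicate characterised: a prefix of s is all '3's iff it lies
-- inside the maximal leading run of '3's
theorem take_eq_replicate_iff (s : List Char) (i : Nat) (hi : i ≤ s.length) :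
    s.take i = List.replicate i '3' ↔ i ≤ (s.takeWhile (· == '3')).length := by
  induction s generalizing i with
  | nil =>
    have : i = 0 := Nat.le_zero.mp hi
    subst this; simp
  | cons c t ih =>
    cases i with
    | zero => simp
    | succ j =>
      simp only [List.length_cons] at hi
      by_cases h : c = '3'
      · subst h
        simp only [List.take_succ_cons, List.replicate_succ, List.takeWhile,
          List.cons.injEq, true_and, beq_self_eq_true, List.length_cons]
        rw [ih j (by omega)]
        omega
      · have hb : (c == '3') = false := by simp [h]
        simp [List.take_succ_cons, List.replicate_succ, List.takeWhile, hb, h]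

theorem bsearch3_eq (s : List Char) (lo hi : Nat)
    (h1 : lo ≤ (s.takeWhile (· == '3')).length)
    (h2 : (s.takeWhile (· == '3')).length ≤ hi) (h3 : hi ≤ s.length) :
    bsearch3 s (List.replicate s.length '3') lo hi = (s.takeWhile (· == '3')).length := by
  fun_induction bsearch3 s (List.replicate s.length '3') lo hi with
  | case1 lo hi hlt mid heq ih =>
    have hmid : lo < mid ∧ mid ≤ hi := by simp only [mid]; omega
    apply ih _ h2 h3
    have : (List.replicate s.length '3').take mid = List.replicate mid '3' := by
      rw [List.take_replicate]; congr 1; omega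
    rw [this] at heq
    exact (take_eq_replicate_iff s mid (by omega)).mp heq
  | case2 lo hi hlt mid hne ih =>
    have hmid : lo < mid ∧ mid ≤ hi := by simp only [mid]; omega
    apply ih h1 _ (by omega)
    have : (List.replicate s.length '3').take mid = List.replicate mid '3' := by
      rw [List.take_replicate]; congr 1; omega
    rw [this] at hne
    have := (take_eq_replicate_iff s mid (by omega)).not.mp hne
    omega
  | case3 lo hi hge => omega

-- A's scan characterised by the same quantity
theorem solveLoop_eq (l : List Char) :
    solveLoop l =
      (if (l.takeWhile (· == '3')).length = l.length then l
       else List.replicate ((l.takeWhile (· == '3')).length + 1) '3' ++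
            l.drop ((l.takeWhile (· == '3')).length + 1)) := by
  induction l with
  | nil => simp [solveLoop]
  | cons c t ih =>
    by_cases h : c = '3'
    · subst h
      have hle := takeWhile3_le t
      simp only [solveLoop, ne_eq, not_true_eq_false, if_false, List.takeWhile,
        beq_self_eq_true, List.length_cons, ih]
      by_cases ht : (t.takeWhile (· == '3')).length = t.length
      · simp [ht]
      · have h1 : ¬ ((t.takeWhile (· == '3')).length + 1 = t.length + 1) := by omega
        simp [ht, List.replicate_succ]
    · have hb : (c == '3') = false := by simp [h]
      simp [solveLoop, h, List.takeWhile, hb, List.replicate_succ]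

theorem match_eq_getD (o : Option Int) :
    (match o with | some v => v | none => 0) = o.getD 0 := by
  cases o <;> rfl

-- ===== VERDICT (by name: the statement is the Claim_ definition above) =====
theorem solve_spec : Claim_equal_solve := by
  intro n _
  unfold Spec_solve solve solve_alt
  simp only [match_eq_getD, solveLoop_eq]
  set s := (PySem.Int.toStr n).toList with hs
  set k := (s.takeWhile (· == '3')).length with hk
  have hb : bsearch3 s (List.replicate s.length '3') 0 s.length = k :=
    bsearch3_eq s 0 s.length (Nat.zero_le _) (takeWhile3_le s) le_rfl
  simp only [hb]
  by_cases hkl : k = s.length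
  · simp [hkl]
  · have htake : (List.replicate s.length '3').take (k + 1) = List.replicate (k + 1) '3' := by
      rw [List.take_replicate]; congr 1
      have := takeWhile3_le s
      omega
    simp [hkl, htake]
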